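-- pv_equiv track=rewrite | github.com/ahmad-shirazi/DocVAL | docval/training/train_phase_b2.py | _check_reasoning
-- ===== SOURCE A (Python) =====
-- from typing import Optional, Dict, List, Tuple
--
-- def _check_reasoning(cot_steps: List[str], answer: str, bbox: List) -> List[int]:
--     """Check which reasoning steps are problematic"""
--     issues = []
--
--     if len(cot_steps) != 7:
--         return list(range(len(cot_steps)))  # All steps problematic if not 7
--
--     # Step 1: Document understanding
--     if len(cot_steps[0]) < 20 or not any(kw in cot_steps[0].lower()
--                                           for kw in ['document', 'receipt', 'form', 'invoice']):
--         issues.append(0)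
--
--     # Step 2: Question interpretation
--     if len(cot_steps[1]) < 20 or 'question' not in cot_steps[1].lower():
--         issues.append(1)
--
--     # Step 3: Visual localization
--     if len(cot_steps[2]) < 20 or not any(kw in cot_steps[2].lower()
--                                           for kw in ['visual', 'region', 'location', 'where']):
--         issues.append(2)
--
--     # Step 4: Field identification
--     if len(cot_steps[3]) < 20 or not any(kw in cot_steps[3].lower()
--                                           for kw in ['field', 'label', 'located', 'found']):
--         issues.append(3)
--
--     # Step 5: Answer extraction (should mention the answer)
--     if len(cot_steps[4]) < 20 or not answer or answer.lower() not in cot_steps[4].lower():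
--         issues.append(4)
--
--     # Step 6: Spatial verification
--     if len(cot_steps[5]) < 20 or not any(kw in cot_steps[5].lower()
--                                           for kw in ['spatial', 'position', 'verify', 'confirm']):
--         issues.append(5)
--
--     # Step 7: Bbox determination (should mention bbox/coordinates)
--     if len(cot_steps[6]) < 20 or 'bbox' not in cot_steps[6].lower():
--         issues.append(6)
--
--     return issues
-- ===== SOURCE B (Python) =====
-- from typing import List
--
-- def _check_reasoning(cot_steps: List[str], answer: str, bbox: List) -> List[int]:
--     """Uniform recursive re-implementation: every step check is 'long enough and
--     mentions one of a list of keywords'; step 5's required keyword is the answer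
--     itself (an empty answer gives an empty keyword list, which can never match)."""
--     if len(cot_steps) != 7:
--         return list(range(len(cot_steps)))
--     keyword_lists = [
--         ['document', 'receipt', 'form', 'invoice'],
--         ['question'],
--         ['visual', 'region', 'location', 'where'],
--         ['field', 'label', 'located', 'found'],
--         [answer.lower()] if answer else [],
--         ['spatial', 'position', 'verify', 'confirm'],
--         ['bbox'],
--     ]
--     def bad(steps, kws, i):
--         if not steps:
--             return []
--         rest = bad(steps[1:], kws[1:], i + 1)
--         text = steps[0].lower()
--         if len(steps[0]) < 20 or not any(k in text for k in kws[0]):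
--             return [i] + rest
--         return rest
--     return bad(cot_steps, keyword_lists, 0)
-- ===== Notes on version B (the rewrite author's own statement) =====
-- stated objective: simpler
-- what changed: Replaces the seven inline if-blocks appending to an accumulator by a single uniform notion of check (length >= 20 and some keyword of a per-step keyword list occurs), evaluated by a recursive walk over the steps paired with their keyword lists; the answer-mentions check of step 5 and the single-keyword checks of steps 2 and 7 become ordinary one-element (or empty) keyword lists instead of separate code paths.
import Mathlib
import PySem

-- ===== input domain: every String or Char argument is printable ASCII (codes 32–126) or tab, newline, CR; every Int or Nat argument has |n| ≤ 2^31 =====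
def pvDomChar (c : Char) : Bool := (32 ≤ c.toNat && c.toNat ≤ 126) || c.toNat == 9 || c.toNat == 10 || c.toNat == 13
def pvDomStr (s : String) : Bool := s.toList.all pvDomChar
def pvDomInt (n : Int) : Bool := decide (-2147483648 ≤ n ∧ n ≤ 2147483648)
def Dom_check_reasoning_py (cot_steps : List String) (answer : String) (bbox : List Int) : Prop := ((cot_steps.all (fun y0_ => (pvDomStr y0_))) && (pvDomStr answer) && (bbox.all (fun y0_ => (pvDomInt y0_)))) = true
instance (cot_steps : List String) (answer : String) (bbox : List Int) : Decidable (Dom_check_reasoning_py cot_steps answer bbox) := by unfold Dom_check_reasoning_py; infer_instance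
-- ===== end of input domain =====

-- B unifies the seven hand-written checks into one rule ('length >= 20 and some
-- keyword of the step's keyword list occurs') applied by a recursive walk over the
-- steps paired with their keyword lists (objective: simpler).


-- ===== PORT A =====
def check_reasoning_py (cot_steps : List String) (answer : String) (bbox : List Int) : List Int :=
  if PySem.List.len cot_steps ≠ 7 then
    PySem.List.pyRange 0 (PySem.List.len cot_steps) 1
  else
    let issues : List Int := []
    let issues := if decide (PySem.Str.len (PySem.List.pyGetD cot_steps 0 "") < 20) ||
        !(["document", "receipt", "form", "invoice"].any
          (fun kw => PySem.Str.isIn kw (PySem.Str.lower (PySem.List.pyGetD cot_steps 0 ""))))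
      then issues ++ [0] else issues
    let issues := if decide (PySem.Str.len (PySem.List.pyGetD cot_steps 1 "") < 20) ||
        !(PySem.Str.isIn "question" (PySem.Str.lower (PySem.List.pyGetD cot_steps 1 "")))
      then issues ++ [1] else issues
    let issues := if decide (PySem.Str.len (PySem.List.pyGetD cot_steps 2 "") < 20) ||
        !(["visual", "region", "location", "where"].any
          (fun kw => PySem.Str.isIn kw (PySem.Str.lower (PySem.List.pyGetD cot_steps 2 ""))))
      then issues ++ [2] else issues
    let issues := if decide (PySem.Str.len (PySem.List.pyGetD cot_steps 3 "") < 20) ||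
        !(["field", "label", "located", "found"].any
          (fun kw => PySem.Str.isIn kw (PySem.Str.lower (PySem.List.pyGetD cot_steps 3 ""))))
      then issues ++ [3] else issues
    let issues := if decide (PySem.Str.len (PySem.List.pyGetD cot_steps 4 "") < 20) ||
        decide (answer = "") ||
        !(PySem.Str.isIn (PySem.Str.lower answer) (PySem.Str.lower (PySem.List.pyGetD cot_steps 4 "")))
      then issues ++ [4] else issues
    let issues := if decide (PySem.Str.len (PySem.List.pyGetD cot_steps 5 "") < 20) ||
        !(["spatial", "position", "verify", "confirm"].any
          (fun kw => PySem.Str.isIn kw (PySem.Str.lower (PySem.List.pyGetD cot_steps 5 ""))))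
      then issues ++ [5] else issues
    let issues := if decide (PySem.Str.len (PySem.List.pyGetD cot_steps 6 "") < 20) ||
        !(PySem.Str.isIn "bbox" (PySem.Str.lower (PySem.List.pyGetD cot_steps 6 "")))
      then issues ++ [6] else issues
    issues

-- ===== PORT B =====
-- Python's inner recursive helper 'bad': walks steps and keyword lists in step;
-- steps[1:]/kws[1:] on (possibly empty) lists is exactly List.tail here.
def pvBad : List String → List (List String) → Int → List Int
  | [], _, _ => []
  | s :: srest, kws, i =>
    let rest := pvBad srest kws.tail (i + 1)
    let text := PySem.Str.lower s
    if decide (PySem.Str.len s < 20) ||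
       !((PySem.List.pyGetD kws 0 []).any (fun k => PySem.Str.isIn k text))
    then i :: rest else rest

def check_reasoning_py_alt (cot_steps : List String) (answer : String) (bbox : List Int) : List Int :=
  if PySem.List.len cot_steps ≠ 7 then
    PySem.List.pyRange 0 (PySem.List.len cot_steps) 1
  else
    let keyword_lists : List (List String) :=
      [["document", "receipt", "form", "invoice"],
       ["question"],
       ["visual", "region", "location", "where"],
       ["field", "label", "located", "found"],
       if answer ≠ "" then [PySem.Str.lower answer] else [],
       ["spatial", "position", "verify", "confirm"],
       ["bbox"]]
    pvBad cot_steps keyword_lists 0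

-- ===== PRECONDITION & SPEC =====
def Spec_check_reasoning_py (cot_steps : List String) (answer : String) (bbox : List Int) (out : List Int) : Prop := out = check_reasoning_py_alt cot_steps answer bbox
instance (cot_steps : List String) (answer : String) (bbox : List Int) (out : List Int) : Decidable (Spec_check_reasoning_py cot_steps answer bbox out) := by unfold Spec_check_reasoning_py; infer_instance

-- ===== CLAIM (what is proved, stated in full; the proofs are below) =====
def Claim_equal_check_reasoning_py : Prop := ∀ (cot_steps : List String) (answer : String) (bbox : List Int), Dom_check_reasoning_py cot_steps answer bbox → Spec_check_reasoning_py cot_steps answer bbox (check_reasoning_py cot_steps answer bbox)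

-- ===== LEMMAS AND PROOFS =====

set_option maxHeartbeats 1600000 in
theorem check_reasoning_eq (cot_steps : List String) (answer : String) (bbox : List Int) :
    check_reasoning_py cot_steps answer bbox = check_reasoning_py_alt cot_steps answer bbox := by
  by_cases hl : cot_steps.length = 7
  · rcases cot_steps with _|⟨a,_|⟨b,_|⟨c,_|⟨d,_|⟨e,_|⟨f,_|⟨g,t⟩⟩⟩⟩⟩⟩⟩ <;>
      simp only [List.length_nil, List.length_cons] at hl <;> try omega
    have ht : t = [] := by
      cases t
      · rfl
      · simp at hl
    subst ht
    have hA : ¬ (PySem.List.len [a, b, c, d, e, f, g] ≠ 7) := by simp [PySem.List.len_eq]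
    unfold check_reasoning_py check_reasoning_py_alt
    rw [if_neg hA, if_neg hA]
    by_cases hans : answer = ""
    · subst hans
      simp only [pvBad, List.tail_cons, PySem.List.pyGetD_zero_cons,
        show PySem.List.pyGetD [a,b,c,d,e,f,g] 0 "" = a from rfl,
        show PySem.List.pyGetD [a,b,c,d,e,f,g] 1 "" = b from rfl,
        show PySem.List.pyGetD [a,b,c,d,e,f,g] 2 "" = c from rfl,
        show PySem.List.pyGetD [a,b,c,d,e,f,g] 3 "" = d from rfl,
        show PySem.List.pyGetD [a,b,c,d,e,f,g] 4 "" = e from rfl,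
        show PySem.List.pyGetD [a,b,c,d,e,f,g] 5 "" = f from rfl,
        show PySem.List.pyGetD [a,b,c,d,e,f,g] 6 "" = g from rfl,
        show (decide (("" : String) = "")) = true from rfl, decide_true,
        ne_eq, not_true, if_false, List.any_cons, List.any_nil,
        Bool.or_false, Bool.not_false, Bool.or_true, Bool.true_or, if_true]
      generalize (decide (PySem.Str.len a < 20) || !(PySem.Str.isIn "document" (PySem.Str.lower a) || (PySem.Str.isIn "receipt" (PySem.Str.lower a) || (PySem.Str.isIn "form" (PySem.Str.lower a) || PySem.Str.isIn "invoice" (PySem.Str.lower a))))) = p0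
      generalize (decide (PySem.Str.len b < 20) || !PySem.Str.isIn "question" (PySem.Str.lower b)) = p1
      generalize (decide (PySem.Str.len c < 20) || !(PySem.Str.isIn "visual" (PySem.Str.lower c) || (PySem.Str.isIn "region" (PySem.Str.lower c) || (PySem.Str.isIn "location" (PySem.Str.lower c) || PySem.Str.isIn "where" (PySem.Str.lower c))))) = p2
      generalize (decide (PySem.Str.len d < 20) || !(PySem.Str.isIn "field" (PySem.Str.lower d) || (PySem.Str.isIn "label" (PySem.Str.lower d) || (PySem.Str.isIn "located" (PySem.Str.lower d) || PySem.Str.isIn "found" (PySem.Str.lower d))))) = p3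
      generalize (decide (PySem.Str.len f < 20) || !(PySem.Str.isIn "spatial" (PySem.Str.lower f) || (PySem.Str.isIn "position" (PySem.Str.lower f) || (PySem.Str.isIn "verify" (PySem.Str.lower f) || PySem.Str.isIn "confirm" (PySem.Str.lower f))))) = p5
      generalize (decide (PySem.Str.len g < 20) || !PySem.Str.isIn "bbox" (PySem.Str.lower g)) = p6
      cases p0 <;> cases p1 <;> cases p2 <;> cases p3 <;> cases p5 <;> cases p6 <;> rfl
    · simp only [pvBad, List.tail_cons, PySem.List.pyGetD_zero_cons,
        show PySem.List.pyGetD [a,b,c,d,e,f,g] 0 "" = a from rfl,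
        show PySem.List.pyGetD [a,b,c,d,e,f,g] 1 "" = b from rfl,
        show PySem.List.pyGetD [a,b,c,d,e,f,g] 2 "" = c from rfl,
        show PySem.List.pyGetD [a,b,c,d,e,f,g] 3 "" = d from rfl,
        show PySem.List.pyGetD [a,b,c,d,e,f,g] 4 "" = e from rfl,
        show PySem.List.pyGetD [a,b,c,d,e,f,g] 5 "" = f from rfl,
        show PySem.List.pyGetD [a,b,c,d,e,f,g] 6 "" = g from rfl,
        ne_eq, hans, not_false_iff, if_true, decide_false, List.any_cons, List.any_nil,
        Bool.or_false]
      generalize (decide (PySem.Str.len a < 20) || !(PySem.Str.isIn "document" (PySem.Str.lower a) || (PySem.Str.isIn "receipt" (PySem.Str.lower a) || (PySem.Str.isIn "form" (PySem.Str.lower a) || PySem.Str.isIn "invoice" (PySem.Str.lower a))))) = p0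
      generalize (decide (PySem.Str.len b < 20) || !PySem.Str.isIn "question" (PySem.Str.lower b)) = p1
      generalize (decide (PySem.Str.len c < 20) || !(PySem.Str.isIn "visual" (PySem.Str.lower c) || (PySem.Str.isIn "region" (PySem.Str.lower c) || (PySem.Str.isIn "location" (PySem.Str.lower c) || PySem.Str.isIn "where" (PySem.Str.lower c))))) = p2
      generalize (decide (PySem.Str.len d < 20) || !(PySem.Str.isIn "field" (PySem.Str.lower d) || (PySem.Str.isIn "label" (PySem.Str.lower d) || (PySem.Str.isIn "located" (PySem.Str.lower d) || PySem.Str.isIn "found" (PySem.Str.lower d))))) = p3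
      generalize (decide (PySem.Str.len e < 20) || !PySem.Str.isIn (PySem.Str.lower answer) (PySem.Str.lower e)) = p4
      generalize (decide (PySem.Str.len f < 20) || !(PySem.Str.isIn "spatial" (PySem.Str.lower f) || (PySem.Str.isIn "position" (PySem.Str.lower f) || (PySem.Str.isIn "verify" (PySem.Str.lower f) || PySem.Str.isIn "confirm" (PySem.Str.lower f))))) = p5
      generalize (decide (PySem.Str.len g < 20) || !PySem.Str.isIn "bbox" (PySem.Str.lower g)) = p6
      cases p0 <;> cases p1 <;> cases p2 <;> cases p3 <;> cases p4 <;> cases p5 <;> cases p6 <;> rfl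
  · have hne : PySem.List.len cot_steps ≠ 7 := by simp [PySem.List.len_eq]; omega
    unfold check_reasoning_py check_reasoning_py_alt
    rw [if_pos hne, if_pos hne]

-- ===== VERDICT (by name: the statement is the Claim_ definition above) =====
theorem check_reasoning_py_spec : Claim_equal_check_reasoning_py := by
  intro cot_steps answer bbox _
  exact check_reasoning_eq cot_steps answer bbox
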